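-- pv_equiv track=rewrite | github.com/sachadavies/amads | amads/core/vectors_sets.py | indices_to_interval
-- ===== SOURCE A (Python) =====
-- from typing import Iterable, Union, Optional
--
-- def vector_to_multiset(vector: tuple[int, ...]) -> tuple:
--     """
--     Converts any "vector" (count of integers organised by index)
--     to a corresponding "multiset" (unordered integers).
--
--     Parameters
--     ----------
--     vector: The input vector.
--
--     Returns
--     -------
--     tuple: The corresponding set as a tuple (because it will often be a multiset).
--
--     Examples
--     --------
--     >>> test_vector = (0, 3, 2, 1, 0, 0, 0)
--     >>> resulting_set = vector_to_multiset(test_vector)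
--     >>> resulting_set
--     (1, 1, 1, 2, 2, 3)
--
--     >>> roundtrip = multiset_to_vector(resulting_set, max_index=6)
--     >>> roundtrip
--     (0, 3, 2, 1, 0, 0, 0)
--
--     >>> roundtrip == test_vector
--     True
--
--     """
--     return tuple(i for i, count in enumerate(vector) for _ in range(count))
--
-- def vector_to_set(vector: tuple[int, ...]) -> set:
--     """
--     Converts any "vector" (count of integers organised by index)
--     to a corresponding "set" of the distinct non-0 indices.
--     cf `vector_to_multiset`
--
--     Parameters
--     ----------
--     vector: The input vector.
--
--     Returns
--     -------
--     set: The corresponding set.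
--
--     Examples
--     --------
--     >>> test_vector = (0, 3, 2, 1, 0, 0, 0)
--     >>> resulting_set = vector_to_set(test_vector)
--     >>> resulting_set
--     {1, 2, 3}
--     """
--     return set(vector_to_multiset(vector))
--
-- def indices_to_interval(
--         vector: Union[list[int], tuple[int, ...]],
--         wrap: bool = True
-- ) -> tuple:
--     """
--     Given a vector (assumed to be indicator)
--     convert from 1/0 at each index to the intervals between the 1s.
--
--     Examples
--     --------
--     >>> bembé = (1, 0, 1, 0, 1, 1, 0, 1, 0, 1, 0, 1)
--     >>> indices_to_interval(bembé)
--     (2, 2, 1, 2, 2, 2, 1)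
--
--     """
--     if wrap:
--         vector = list(vector)
--         vector.append(vector[0])
--     set_as_list = list(vector_to_set(vector))
--     set_as_list.sort()
--     return tuple([set_as_list[i + 1] - set_as_list[i] for i in range(len(set_as_list) - 1)])
-- ===== SOURCE B (Python) =====
-- def indices_to_interval(vector, wrap=True):
--     if wrap:
--         vector = list(vector)
--         vector.append(vector[0])
--     # single pass with an accumulator: remember the previous positive index,
--     # emit the gap as soon as the next one is seen
--     out = []
--     prev = None
--     for i, c in enumerate(vector):
--         if c > 0:
--             if prev is not None:
--                 out.append(i - prev)
--             prev = i
--     return tuple(out)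
-- ===== Notes on version B (the rewrite author's own statement) =====
-- stated objective: simpler
-- what changed: Instead of expanding counts into a multiset, deduplicating through a set and re-sorting before an indexed difference loop, B makes one stateful pass that remembers the previous positive index and emits each gap immediately, never materialising the index list.
-- outside the precondition, e.g. on indices_to_interval([], True): A raises IndexError, B raises IndexError
import Mathlib
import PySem

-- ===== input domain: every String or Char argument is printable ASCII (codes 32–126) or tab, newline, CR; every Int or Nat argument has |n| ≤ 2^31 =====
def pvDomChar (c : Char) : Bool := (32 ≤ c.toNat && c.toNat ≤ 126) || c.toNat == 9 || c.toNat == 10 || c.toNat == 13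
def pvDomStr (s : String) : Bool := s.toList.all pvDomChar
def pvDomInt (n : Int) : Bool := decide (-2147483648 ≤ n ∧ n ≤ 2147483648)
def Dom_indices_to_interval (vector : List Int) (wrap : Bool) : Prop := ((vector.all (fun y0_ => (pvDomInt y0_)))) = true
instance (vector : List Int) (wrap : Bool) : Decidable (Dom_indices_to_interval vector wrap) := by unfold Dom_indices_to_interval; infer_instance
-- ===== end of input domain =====

-- B replaces A's multiset expansion + set dedup + sort + indexed difference loop by a
-- single stateful pass that remembers the previous positive index and emits each gap
-- as it is seen (objective: simpler).

-- ===== PORT A =====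
-- vector.append(vector[0]): vector[0] raises IndexError on []; Pre_ excludes that case, so
-- pyGetD … 0 0 is exact here.  'for i in range(len(..) - 1)' is ported as List.range over the
-- Nat length - 1: exact, since for len = 0 Python's range(-1) and Nat's 0 - 1 = 0 both give [].
def indices_to_interval (vector : List Int) (wrap : Bool) : List Int :=
  let v := if wrap then vector ++ [PySem.List.pyGetD vector 0 0] else vector
  -- vector_to_multiset: tuple(i for i, count in enumerate(v) for _ in range(count))
  let multiset : List Int :=
    (PySem.List.enumerate v 0).flatMap (fun p => (PySem.List.pyRange 0 p.2 1).map (fun _ => p.1))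
  -- vector_to_set, list(...), .sort()  (iteration order of the set is consumed by the sort only)
  let setAsList : List Int := PySem.List.sorted (PySem.Set.ofList multiset) (fun x => x)
  (List.range (setAsList.length - 1)).map (fun i => setAsList.getD (i + 1) 0 - setAsList.getD i 0)

-- ===== PORT B =====
-- same wrap step as A; the loop's state (prev, out) becomes a foldl accumulator pair.
def indices_to_interval_alt (vector : List Int) (wrap : Bool) : List Int :=
  let v := if wrap then vector ++ [PySem.List.pyGetD vector 0 0] else vector
  ((PySem.List.enumerate v 0).foldl
    (fun st p =>
      if 0 < p.2 then
        (some p.1,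
         match st.1 with
         | some prev => st.2 ++ [p.1 - prev]
         | none => st.2)
      else st)
    ((none : Option Int), ([] : List Int))).2

-- ===== PRECONDITION & SPEC =====
-- Pre_ excludes only the inputs where A raises IndexError (wrap=True on the empty list;
-- B raises there too).
def Pre_indices_to_interval (vector : List Int) (wrap : Bool) : Prop :=
  wrap = true → vector ≠ []
instance (vector : List Int) (wrap : Bool) : Decidable (Pre_indices_to_interval vector wrap) := by unfold Pre_indices_to_interval; infer_instance
def pvWitness_indices_to_interval : List Int × Bool := ([1, 0, 1, 0, 1, 1], true)

def Spec_indices_to_interval (vector : List Int) (wrap : Bool) (out : List Int) : Prop := out = indices_to_interval_alt vector wrap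
instance (vector : List Int) (wrap : Bool) (out : List Int) : Decidable (Spec_indices_to_interval vector wrap out) := by unfold Spec_indices_to_interval; infer_instance

-- ===== CLAIM (what is proved, stated in full; the proofs are below) =====
def Claim_equal_indices_to_interval : Prop := ∀ (vector : List Int) (wrap : Bool), Dom_indices_to_interval vector wrap → Pre_indices_to_interval vector wrap → Spec_indices_to_interval vector wrap (indices_to_interval vector wrap)

-- ===== LEMMAS AND PROOFS =====

-- folding Set.add over elements already in the accumulator changes nothing
theorem pv_foldl_add_keep (t acc : List Int) (h : ∀ y ∈ t, y ∈ acc) :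
    List.foldl PySem.Set.add acc t = acc := by
  induction t generalizing acc with
  | nil => rfl
  | cons y t ih =>
      have hy : y ∈ acc := h y (by simp)
      simp only [List.foldl_cons, PySem.Set.add]
      rw [if_pos (by simpa using hy)]
      exact ih acc (fun z hz => h z (by simp [hz]))

-- a prefix of the Set accumulator disjoint from the remaining elements is inert
theorem pv_foldl_add_append (t acc1 acc2 : List Int) (h : ∀ y ∈ t, y ∉ acc1) :
    List.foldl PySem.Set.add (acc1 ++ acc2) t = acc1 ++ List.foldl PySem.Set.add acc2 t := by
  induction t generalizing acc2 with
  | nil => rfl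
  | cons y t ih =>
      have hy : y ∉ acc1 := h y (by simp)
      simp only [List.foldl_cons, PySem.Set.add]
      have h1 : PySem.Set.contains (acc1 ++ acc2) y = PySem.Set.contains acc2 y := by
        simp [PySem.Set.contains]
        intro hmem
        exact absurd hmem hy
      rw [h1]
      by_cases hc : PySem.Set.contains acc2 y = true
      · rw [if_pos hc, if_pos hc]
        exact ih acc2 (fun z hz => h z (by simp [hz]))
      · rw [if_neg hc, if_neg hc, List.append_assoc]
        exact ih (acc2 ++ [y]) (fun z hz => h z (by simp [hz]))

theorem pv_ofList_append_disjoint (xs ys : List Int) (h : ∀ y ∈ ys, y ∉ xs) :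
    PySem.Set.ofList (xs ++ ys) = PySem.Set.ofList xs ++ PySem.Set.ofList ys := by
  unfold PySem.Set.ofList
  rw [List.foldl_append]
  have hd : ∀ y ∈ ys, y ∉ List.foldl PySem.Set.add PySem.Set.empty xs := by
    intro y hy hmem
    exact h y hy ((PySem.Set.mem_ofList xs y).mp hmem)
  calc List.foldl PySem.Set.add (List.foldl PySem.Set.add PySem.Set.empty xs) ys
      = List.foldl PySem.Set.add (List.foldl PySem.Set.add PySem.Set.empty xs ++ PySem.Set.empty) ys := by
        simp [PySem.Set.empty]
    _ = _ := pv_foldl_add_append ys _ PySem.Set.empty hd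

-- set() of one expanded count block
theorem pv_ofList_block (c s : Int) :
    PySem.Set.ofList ((PySem.List.pyRange 0 c 1).map (fun _ => s))
      = if 0 < c then [s] else [] := by
  have hrep : (PySem.List.pyRange 0 c 1).map (fun _ => s) = List.replicate c.toNat s := by
    rw [List.map_const']; simp [pysem]
  rw [hrep]
  by_cases hc : 0 < c
  · rw [if_pos hc]
    obtain ⟨n, hn⟩ : ∃ n, c.toNat = n + 1 := ⟨c.toNat - 1, by omega⟩
    rw [hn, List.replicate_succ]
    show List.foldl PySem.Set.add PySem.Set.empty (s :: List.replicate n s) = [s]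
    simp only [List.foldl_cons]
    exact pv_foldl_add_keep _ _ (by intro y hy; simp_all [List.eq_of_mem_replicate hy])
  · rw [if_neg hc]
    have : c.toNat = 0 := by omega
    rw [this]; rfl

-- abbreviation for A's multiset
def pvM (v : List Int) (s : Int) : List Int :=
  (PySem.List.enumerate v s).flatMap (fun p => (PySem.List.pyRange 0 p.2 1).map (fun _ => p.1))

theorem pv_mem_M_ge (v : List Int) (s x : Int) (hx : x ∈ pvM v s) : s ≤ x := by
  unfold pvM at hx
  rw [List.mem_flatMap] at hx
  obtain ⟨p, hp, hxp⟩ := hx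
  rw [List.mem_map] at hxp
  obtain ⟨_, _, rfl⟩ := hxp
  rw [PySem.List.mem_enumerate_iff] at hp
  obtain ⟨k, hk, rfl⟩ := hp
  omega

-- the key fact: set(multiset) in first-occurrence order IS the increasing list of positive indices
theorem pv_ofList_M (v : List Int) (s : Int) :
    PySem.Set.ofList (pvM v s)
      = ((PySem.List.enumerate v s).filter (fun p => decide (0 < p.2))).map (fun p => p.1) := by
  induction v generalizing s with
  | nil => rfl
  | cons c v ih =>
      have hM : pvM (c :: v) s
          = (PySem.List.pyRange 0 c 1).map (fun _ => s) ++ pvM v (s + 1) := by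
        unfold pvM; rw [PySem.List.enumerate_cons]; simp [List.flatMap_cons]
      have hdisj : ∀ y ∈ pvM v (s + 1), y ∉ (PySem.List.pyRange 0 c 1).map (fun _ => s) := by
        intro y hy hmem
        have h1 : s + 1 ≤ y := pv_mem_M_ge v (s + 1) y hy
        rw [List.mem_map] at hmem
        obtain ⟨_, _, rfl⟩ := hmem
        omega
      rw [hM, pv_ofList_append_disjoint _ _ hdisj, pv_ofList_block, ih,
        PySem.List.enumerate_cons]
      by_cases hc : 0 < c
      · rw [if_pos hc]
        simp [hc]
      · rw [if_neg hc]
        simp [hc]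

-- the collected indices are strictly increasing
theorem pv_indices_pairwise (v : List Int) (s : Int) :
    (((PySem.List.enumerate v s).filter (fun p => decide (0 < p.2))).map (fun p => p.1)).Pairwise (· < ·) := by
  rw [List.pairwise_map]
  exact (PySem.List.pairwise_lt_enumerate v s).sublist (List.filter_sublist (l := PySem.List.enumerate v s))

-- A's indexed-difference loop equals the zip of adjacent pairs, for ANY list
theorem pv_diffs (L : List Int) :
    (List.range (L.length - 1)).map (fun i => L.getD (i + 1) 0 - L.getD i 0)
      = (L.zip (L.drop 1)).map (fun p => p.2 - p.1) := by
  induction L with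
  | nil => rfl
  | cons x L ih =>
      cases L with
      | nil => rfl
      | cons y t =>
          have hlen : (x :: y :: t).length - 1 = (y :: t).length := by simp
          rw [hlen]
          have hr : List.range (y :: t).length = 0 :: (List.range ((y :: t).length - 1)).map (· + 1) := by
            have : (y :: t).length = ((y :: t).length - 1) + 1 := by simp
            rw [this, List.range_succ_eq_map]; simp
          rw [hr]
          simp only [List.map_cons, List.map_map]
          have hzip : ((x :: y :: t).zip ((x :: y :: t).drop 1)).map (fun p => p.2 - p.1)
              = (y - x) :: ((y :: t).zip ((y :: t).drop 1)).map (fun p => p.2 - p.1) := by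
            cases t <;> simp
          rw [hzip]
          congr 1

-- what B's loop emits given the previous positive index and the index list still to come
def pvDiffsFrom : Option Int → List Int → List Int
  | _, [] => []
  | none, x :: xs => pvDiffsFrom (some x) xs
  | some p, x :: xs => (x - p) :: pvDiffsFrom (some x) xs

theorem pv_diffsFrom_some (L : List Int) (p : Int) :
    pvDiffsFrom (some p) L = ((p :: L).zip L).map (fun q => q.2 - q.1) := by
  induction L generalizing p with
  | nil => rfl
  | cons x xs ih => simp [pvDiffsFrom, ih]

theorem pv_diffsFrom_none (L : List Int) :
    pvDiffsFrom none L = (L.zip (L.drop 1)).map (fun q => q.2 - q.1) := by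
  cases L with
  | nil => rfl
  | cons x xs => simpa [pvDiffsFrom] using pv_diffsFrom_some xs x

-- B's fold, described through the positive indices of its remaining input
theorem pv_fold_eq (L : List (Int × Int)) (prev : Option Int) (out : List Int) :
    ((L.foldl
      (fun st p =>
        if 0 < p.2 then
          (some p.1,
           match st.1 with
           | some prev => st.2 ++ [p.1 - prev]
           | none => st.2)
        else st)
      (prev, out))).2
    = out ++ pvDiffsFrom prev ((L.filter (fun p => decide (0 < p.2))).map (fun p => p.1)) := by
  induction L generalizing prev out with
  | nil => simp [pvDiffsFrom]
  | cons q t ih =>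
      by_cases hq : 0 < q.2
      · simp only [List.foldl_cons, if_pos hq, List.filter_cons, hq, decide_true, List.map_cons]
        cases prev with
        | none => simpa [pvDiffsFrom] using ih (some q.1) out
        | some p => simp [pvDiffsFrom, ih (some q.1) (out ++ [q.1 - p])]
      · simp only [List.foldl_cons, if_neg hq, List.filter_cons, hq, decide_false]
        simpa using ih prev out

-- ===== VERDICT (by name: the statement is the Claim_ definition above) =====
theorem indices_to_interval_spec : Claim_equal_indices_to_interval := by
  intro vector wrap _ _
  show indices_to_interval vector wrap = indices_to_interval_alt vector wrap
  unfold indices_to_interval indices_to_interval_alt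
  set v := if wrap then vector ++ [PySem.List.pyGetD vector 0 0] else vector with hv
  have hkey : PySem.List.sorted
        (PySem.Set.ofList ((PySem.List.enumerate v 0).flatMap
          (fun p => (PySem.List.pyRange 0 p.2 1).map (fun _ => p.1)))) (fun x => x)
      = ((PySem.List.enumerate v 0).filter (fun p => decide (0 < p.2))).map (fun p => p.1) := by
    apply PySem.List.sorted_eq_of_perm_of_pairwise_lt
    · rw [show ((PySem.List.enumerate v 0).flatMap
          (fun p => (PySem.List.pyRange 0 p.2 1).map (fun _ => p.1))) = pvM v 0 from rfl,
        pv_ofList_M]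
    · exact pv_indices_pairwise v 0
  simp only [hkey, pv_fold_eq, pv_diffsFrom_none, List.nil_append]
  exact pv_diffs _
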